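-- pv_equiv track=rewrite | github.com/jichen3000/codes | python/leetcode/dynamic_programming/712_Minimum_ASCII_Delete_Sum_for_Two_Strings.py | cal_value
-- ===== SOURCE A (Python) =====
-- def cal_value(s1, s2):
--     n1 = len(s1)
--     n2 = len(s2)
--     if s1 == s2: return 0
--     if n1 == 0: return sum(ord(c) for c in s2)
--     j = 0
--     results = ""
--     for i in range(n1):
--         j = i + len(results)
--         if j >= n2:
--             return -1
--         while s1[i] != s2[j]:
--             results += s2[j]
--             j += 1
--             if j >= n2:
--                 return -1
--     # i.p()
--     if j < n2-1:
--         results += s2[j+1:]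
--     if len(results) > 0:
--         return sum(ord(c) for c in results)
--     else:
--         return 0
-- ===== SOURCE B (Python) =====
-- def cal_value(s1, s2):
--     it = iter(s2)
--     if all(c in it for c in s1):
--         return sum(map(ord, s2)) - sum(map(ord, s1))
--     return -1
-- ===== Notes on version B (the rewrite author's own statement) =====
-- stated objective: simpler
-- what changed: B replaces A's character-by-character accumulation of the skipped substring with a plain greedy subsequence test plus the closed-form difference of the two total ASCII sums, so no 'results' string is ever built.
import Mathlib
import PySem

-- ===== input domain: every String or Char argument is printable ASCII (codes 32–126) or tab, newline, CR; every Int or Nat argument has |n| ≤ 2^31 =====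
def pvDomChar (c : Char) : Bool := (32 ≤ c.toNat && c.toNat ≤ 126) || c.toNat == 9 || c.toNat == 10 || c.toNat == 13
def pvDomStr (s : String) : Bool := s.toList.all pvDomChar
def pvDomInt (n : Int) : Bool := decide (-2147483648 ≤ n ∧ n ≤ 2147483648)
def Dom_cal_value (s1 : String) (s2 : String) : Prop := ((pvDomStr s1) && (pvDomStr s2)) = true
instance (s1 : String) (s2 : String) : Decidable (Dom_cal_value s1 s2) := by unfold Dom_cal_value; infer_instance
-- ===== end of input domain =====

-- B replaces A's skipped-character string accumulation by a plain subsequence check plus the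
-- closed-form difference of the two ASCII sums (objective: simpler; no measured speed claim).

-- ===== PORT A =====
-- sum(ord(c) for c in l)
def sumOrdA (l : List Char) : Int := l.foldl (fun a c => a + (c.toNat : Int)) 0

-- the 'while s1[i] != s2[j]' loop; 'none' = the 'return -1' inside it.
-- Indexing uses getD: every access s1[i], s2[j] in A is guarded (i < n1 by range, j < n2 checked
-- just before), so getD with in-range indices is exact.
def innerA (l1 l2 : List Char) (i j : Nat) (results : List Char) : Option (Nat × List Char) :=
  if l1.getD i ' ' ≠ l2.getD j ' ' then
    let results := results ++ [l2.getD j ' ']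
    let j := j + 1
    if h : j ≥ l2.length then none
    else innerA l1 l2 i j results
  else some (j, results)
termination_by l2.length - j
decreasing_by omega

-- the 'for i in range(n1)' loop, threading j and results; 'none' = 'return -1'
def outerA (l1 l2 : List Char) (i : Nat) (results : List Char) (j : Nat) : Option (Nat × List Char) :=
  if h : i < l1.length then
    let j := i + results.length
    if j ≥ l2.length then none
    else match innerA l1 l2 i j results with
      | none => none
      | some (j', r') => outerA l1 l2 (i + 1) r' j'
  else some (j, results)
termination_by l1.length - i

def cal_value (s1 : String) (s2 : String) : Int :=
  let l1 := s1.toList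
  let l2 := s2.toList
  if s1 = s2 then 0
  else if l1.length = 0 then sumOrdA l2
  else
    match outerA l1 l2 0 [] 0 with
    | none => -1
    | some (j, results) =>
      let results := if (j : Int) < (l2.length : Int) - 1 then results ++ l2.drop (j + 1) else results
      if results.length > 0 then sumOrdA results else 0

-- ===== PORT B =====
-- greedy left-to-right subsequence test ('all(c in it for c in s1)')
def isSub : List Char → List Char → Bool
  | [], _ => true
  | _ :: _, [] => false
  | c :: cs, d :: ds => if c = d then isSub cs ds else isSub (c :: cs) ds

def sumOrdB (l : List Char) : Int := (l.map (fun c => (c.toNat : Int))).sum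

def cal_value_alt (s1 : String) (s2 : String) : Int :=
  if isSub s1.toList s2.toList then sumOrdB s2.toList - sumOrdB s1.toList else -1

-- ===== PRECONDITION & SPEC =====
def Spec_cal_value (s1 : String) (s2 : String) (out : Int) : Prop := out = cal_value_alt s1 s2
instance (s1 : String) (s2 : String) (out : Int) : Decidable (Spec_cal_value s1 s2 out) := by unfold Spec_cal_value; infer_instance

-- ===== CLAIM (what is proved, stated in full; the proofs are below) =====
def Claim_equal_cal_value : Prop := ∀ (s1 : String) (s2 : String), Dom_cal_value s1 s2 → Spec_cal_value s1 s2 (cal_value s1 s2)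

-- ===== LEMMAS AND PROOFS =====

-- specification-side greedy scan: skipped prefix of t before the first c, and the rest after it
def findSkip (c : Char) : List Char → Option (List Char × List Char)
  | [] => none
  | d :: ds => if c = d then some ([], ds)
               else (findSkip c ds).map (fun p => (d :: p.1, p.2))

def greedyL : List Char → List Char → Option (List Char × List Char)
  | [], t => some ([], t)
  | c :: cs, t =>
    match findSkip c t with
    | none => none
    | some (sk, r) => (greedyL cs r).map (fun p => (sk ++ p.1, p.2))

theorem sumOrdA_eq (l : List Char) : sumOrdA l = sumOrdB l := by
  have h : ∀ (a : Int), l.foldl (fun a c => a + (c.toNat : Int)) a = a + sumOrdB l := by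
    induction l with
    | nil => intro a; simp [sumOrdB]
    | cons c cs ih => intro a; simp [List.foldl, sumOrdB, ih, List.map, List.sum_cons]; ring
  simpa [sumOrdA] using h 0

theorem sumOrdB_append (l₁ l₂ : List Char) : sumOrdB (l₁ ++ l₂) = sumOrdB l₁ + sumOrdB l₂ := by
  simp [sumOrdB]

theorem findSkip_decomp (c : Char) (t sk r : List Char) (h : findSkip c t = some (sk, r)) :
    t = sk ++ c :: r := by
  induction t generalizing sk r with
  | nil => simp [findSkip] at h
  | cons d ds ih =>
    by_cases hc : c = d
    · simp [findSkip, hc] at h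
      simp [← h.1, ← h.2, hc]
    · rw [findSkip, if_neg hc] at h
      cases hfs : findSkip c ds with
      | none => rw [hfs] at h; simp at h
      | some p =>
        obtain ⟨a, b⟩ := p
        rw [hfs] at h; simp at h
        obtain ⟨h1, h2⟩ := h
        simp [← h1, ← h2, ih a b hfs]

theorem isSub_refl (l : List Char) : isSub l l = true := by
  induction l with
  | nil => simp [isSub]
  | cons c cs ih => simp [isSub, ih]

theorem isSub_findSkip (c : Char) (cs t : List Char) (h : isSub (c :: cs) t = true) :
    ∃ sk r, findSkip c t = some (sk, r) ∧ isSub cs r = true := by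
  induction t with
  | nil => simp [isSub] at h
  | cons d ds ih =>
    by_cases hc : c = d
    · exact ⟨[], ds, by simp [findSkip, hc], by simpa [isSub, hc] using h⟩
    · have h' : isSub (c :: cs) ds = true := by simpa [isSub, hc] using h
      obtain ⟨sk, r, hfs, hsub⟩ := ih h'
      exact ⟨d :: sk, r, by simp [findSkip, hc, hfs], hsub⟩

theorem isSub_skip (c : Char) (cs sk r : List Char) (hc : c ∉ sk) :
    isSub (c :: cs) (sk ++ c :: r) = isSub cs r := by
  induction sk with
  | nil => simp [isSub]
  | cons d ds ih =>
    have hd : c ≠ d := by intro h; exact hc (by simp [h])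
    simp only [List.cons_append, isSub, if_neg hd]
    exact ih (fun h => hc (by simp [h]))

theorem findSkip_not_mem (c : Char) (t sk r : List Char) (h : findSkip c t = some (sk, r)) :
    c ∉ sk := by
  induction t generalizing sk r with
  | nil => simp [findSkip] at h
  | cons d ds ih =>
    by_cases hc : c = d
    · simp [findSkip, hc] at h
      rw [h.1]; simp
    · rw [findSkip, if_neg hc] at h
      cases hfs : findSkip c ds with
      | none => rw [hfs] at h; simp at h
      | some p =>
        obtain ⟨a, b⟩ := p
        rw [hfs] at h; simp at h
        rw [← h.1]
        simp [hc]
        exact ih a b hfs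

theorem greedyL_isSome_iff (l t : List Char) : (greedyL l t).isSome = isSub l t := by
  induction l generalizing t with
  | nil => simp [greedyL, isSub]
  | cons c cs ih =>
    cases hfs : findSkip c t with
    | none =>
      simp only [greedyL, hfs, Option.isSome_none]
      cases hh : isSub (c :: cs) t
      · rfl
      · obtain ⟨sk, r, hfs', _⟩ := isSub_findSkip c cs t hh
        rw [hfs] at hfs'; simp at hfs'
    | some p =>
      obtain ⟨sk, r⟩ := p
      have ht := findSkip_decomp c t sk r hfs
      have hsub : isSub (c :: cs) t = isSub cs r := by
        rw [ht]; exact isSub_skip c cs sk r (findSkip_not_mem c t sk r hfs)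
      rw [hsub]
      simp only [greedyL, hfs, ← ih r]
      cases greedyL cs r <;> simp

theorem greedyL_sum (l t sk r : List Char) (h : greedyL l t = some (sk, r)) :
    sumOrdB t = sumOrdB sk + sumOrdB l + sumOrdB r := by
  induction l generalizing t sk r with
  | nil =>
    simp [greedyL] at h
    obtain ⟨h1, h2⟩ := h
    subst h1; subst h2
    simp [sumOrdB]
  | cons c cs ih =>
    simp only [greedyL] at h
    cases hfs : findSkip c t with
    | none => rw [hfs] at h; simp at h
    | some p =>
      obtain ⟨sk₁, r₁⟩ := p
      rw [hfs] at h
      simp at h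
      obtain ⟨sk₂, hg, hsk⟩ := h
      have ht := findSkip_decomp c t sk₁ r₁ hfs
      have hih := ih r₁ sk₂ r hg
      rw [ht, ← hsk]
      simp [sumOrdB_append, sumOrdB] at hih ⊢
      omega

theorem greedyL_len (l t sk r : List Char) (h : greedyL l t = some (sk, r)) :
    sk.length + l.length + r.length = t.length := by
  induction l generalizing t sk r with
  | nil => simp [greedyL] at h; simp [← h.1, ← h.2]
  | cons c cs ih =>
    simp only [greedyL] at h
    cases hfs : findSkip c t with
    | none => rw [hfs] at h; simp at h
    | some p =>
      obtain ⟨sk₁, r₁⟩ := p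
      rw [hfs] at h; simp at h
      obtain ⟨sk₂, hg, hsk⟩ := h
      have ht := findSkip_decomp c t sk₁ r₁ hfs
      have hih := ih r₁ sk₂ r hg
      have := congrArg List.length ht
      simp at this
      rw [← hsk]
      simp
      omega

theorem greedyL_drop (l t sk r : List Char) (h : greedyL l t = some (sk, r)) :
    t.drop (t.length - r.length) = r := by
  induction l generalizing t sk r with
  | nil => simp [greedyL] at h; simp [← h.2]
  | cons c cs ih =>
    simp only [greedyL] at h
    cases hfs : findSkip c t with
    | none => rw [hfs] at h; simp at h
    | some p =>
      obtain ⟨sk₁, r₁⟩ := p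
      rw [hfs] at h; simp at h
      obtain ⟨sk₂, hg, hsk⟩ := h
      have ht := findSkip_decomp c t sk₁ r₁ hfs
      have hih := ih r₁ sk₂ r hg
      have hl1 := greedyL_len cs r₁ sk₂ r hg
      have hlt := congrArg List.length ht
      simp at hlt
      rw [ht]
      have h2 : t.length - r.length = sk₁.length + 1 + (r₁.length - r.length) := by omega
      have h3 : (sk₁ ++ c :: r₁).length - r.length = sk₁.length + 1 + (r₁.length - r.length) := by
        simp; omega
      rw [h3, ← List.drop_drop, ← List.drop_drop]
      simp [hih]
theorem innerA_spec (l1 l2 : List Char) (i : Nat) :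
    ∀ j, j < l2.length → ∀ results,
    innerA l1 l2 i j results =
      match findSkip (l1.getD i ' ') (l2.drop j) with
      | none => none
      | some (sk, r) => some (j + sk.length, results ++ sk) := by
  intro j
  induction hj : l2.length - j using Nat.strong_induction_on generalizing j with
  | _ n ih =>
  intro hjl results
  subst hj
  have hdrop : l2.drop j = l2.getD j ' ' :: l2.drop (j + 1) := by
    rw [List.getD_eq_getElem l2 ' ' hjl]
    exact List.drop_eq_getElem_cons hjl
  rw [innerA, hdrop]
  by_cases hc : l1.getD i ' ' = l2.getD j ' '
  · rw [if_neg (by simpa using hc)]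
    rw [findSkip, if_pos hc]
    simp
  · rw [if_pos (by simpa using hc)]
    rw [findSkip, if_neg hc]
    by_cases hend : l2.length ≤ j + 1
    · rw [dif_pos hend]
      have : l2.drop (j + 1) = [] := List.drop_eq_nil_of_le hend
      rw [this]
      simp [findSkip]
    · rw [dif_neg hend]
      rw [ih (l2.length - (j + 1)) (by omega) (j + 1) rfl (by omega) (results ++ [l2.getD j ' '])]
      cases hfs : findSkip (l1.getD i ' ') (l2.drop (j + 1)) with
      | none => simp
      | some p =>
        obtain ⟨sk, r⟩ := p
        simp
        omega

theorem outerA_spec (l1 l2 : List Char) :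
    ∀ k i results j0, i < l1.length → k = l1.length - i → 
    outerA l1 l2 i results j0 =
      match greedyL (l1.drop i) (l2.drop (i + results.length)) with
      | none => none
      | some (sk, r) => some (l2.length - r.length - 1, results ++ sk) := by
  intro k
  induction k using Nat.strong_induction_on with
  | _ k ih =>
  intro i results j0 hi hk
  have hdropl1 : l1.drop i = l1.getD i ' ' :: l1.drop (i + 1) := by
    rw [List.getD_eq_getElem l1 ' ' hi]
    exact List.drop_eq_getElem_cons hi
  rw [outerA, dif_pos hi]
  by_cases hj : i + results.length ≥ l2.length
  · have hempty : l2.drop (i + results.length) = [] := List.drop_eq_nil_of_le hj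
    rw [if_pos hj, hempty, hdropl1]
    simp [greedyL, findSkip]
  · rw [if_neg hj]
    rw [innerA_spec l1 l2 i (i + results.length) (by omega) results]
    cases hfs : findSkip (l1.getD i ' ') (l2.drop (i + results.length)) with
    | none =>
      rw [hdropl1]
      rw [List.getD_eq_getElem?_getD] at hfs
      simp [greedyL, hfs]
    | some p =>
      obtain ⟨sk, r⟩ := p
      have hdec := findSkip_decomp _ _ _ _ hfs
      have hlenD := congrArg List.length hdec
      simp [List.length_drop] at hlenD
      have hdropr : l2.drop (i + results.length + sk.length + 1) = r := by
        have h1 : l2.drop (i + results.length + sk.length + 1)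
             = (l2.drop (i + results.length)).drop (sk.length + 1) := by
          rw [List.drop_drop]; ring_nf
        rw [h1, hdec]
        simp
      rw [List.getD_eq_getElem?_getD] at hfs
      simp only []
      by_cases hi1 : i + 1 < l1.length
      · rw [ih (l1.length - (i + 1)) (by omega) (i + 1) (results ++ sk) (i + results.length + sk.length) hi1 rfl]
        have harg : i + 1 + (results ++ sk).length = i + results.length + sk.length + 1 := by
          simp; omega
        rw [harg, hdropr, hdropl1]
        simp only [greedyL, List.getD_eq_getElem?_getD, hfs]
        cases greedyL (l1.drop (i + 1)) r with
        | none => simp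
        | some q => obtain ⟨sk', r'⟩ := q; simp
      · have : outerA l1 l2 (i + 1) (results ++ sk) (i + results.length + sk.length)
             = some (i + results.length + sk.length, results ++ sk) := by
          rw [outerA, dif_neg (by omega)]
        rw [this, hdropl1]
        have hdl1 : l1.drop (i + 1) = [] := List.drop_eq_nil_of_le (by omega)
        simp only [greedyL, List.getD_eq_getElem?_getD, hfs, hdl1, Option.map]
        simp
        omega
-- ===== VERDICT (by name: the statement is the Claim_ definition above) =====
theorem cal_value_spec : Claim_equal_cal_value := by
  intro s1 s2 _hdom
  unfold Spec_cal_value cal_value cal_value_alt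
  simp only []
  by_cases heq : s1 = s2
  · have : s1.toList = s2.toList := by rw [heq]
    simp [heq, this, isSub_refl]
  · rw [if_neg heq]
    by_cases hn1 : s1.toList.length = 0
    · have h1 : s1.toList = [] := List.length_eq_zero_iff.mp hn1
      simp [hn1, h1, isSub, sumOrdA_eq, sumOrdB]
    · rw [if_neg hn1]
      set l1 := s1.toList with hl1
      set l2 := s2.toList with hl2
      have hi0 : 0 < l1.length := by omega
      rw [outerA_spec l1 l2 (l1.length - 0) 0 [] 0 hi0 rfl]
      simp only [List.drop_zero, List.length_nil, Nat.add_zero, Nat.zero_add]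
      cases hg : greedyL l1 l2 with
      | none =>
        have hns : isSub l1 l2 = false := by
          have := greedyL_isSome_iff l1 l2
          rw [hg] at this; simpa using this.symm
        simp [hns]
      | some p =>
        obtain ⟨sk, r⟩ := p
        have hs : isSub l1 l2 = true := by
          have := greedyL_isSome_iff l1 l2
          rw [hg] at this; simpa using this.symm
        have hsum := greedyL_sum l1 l2 sk r hg
        have hlen := greedyL_len l1 l2 sk r hg
        simp only [hs, if_true]
        by_cases hrnil : r = []
        · have hnotlt : ¬ ((l2.length - r.length - 1 : Nat) : Int) < (l2.length : Int) - 1 := by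
            subst hrnil; simp at hlen ⊢; omega
          rw [if_neg hnotlt]
          subst hrnil
          by_cases hsknil : sk = []
          · subst hsknil
            simp [sumOrdB] at hsum ⊢
            omega
          · rw [if_pos (by simp [List.length_pos_iff]; exact hsknil)]
            rw [sumOrdA_eq]
            simp [sumOrdB] at hsum ⊢
            omega
        · have hrpos : 0 < r.length := List.length_pos_iff.mpr hrnil
          have hlt : ((l2.length - r.length - 1 : Nat) : Int) < (l2.length : Int) - 1 := by
            omega
          rw [if_pos hlt]
          have hdropr : l2.drop (l2.length - r.length - 1 + 1) = r := by
            have h1 : l2.length - r.length - 1 + 1 = l2.length - r.length := by omega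
            rw [h1]
            exact greedyL_drop l1 l2 sk r hg
          rw [hdropr]
          rw [if_pos (by simp; omega)]
          rw [sumOrdA_eq, sumOrdB_append]
          simp [sumOrdB] at hsum ⊢
          omega
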